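-- pv_equiv track=rewrite | github.com/hkcert-ctf/CTF-Challenges | CTF-2023/63-scratch-maze/writeup/solve.py | gen_number
-- ===== SOURCE A (Python) =====
-- def gen_number(seq):
--     def lls(s: str, c: str):
--         r = 0
--         for i in range(len(s)):
--             if s[i] != c:
--                 continue
--             r += (i+1) # 1-based index
--         return r
--     cl = lls(seq, 'l') % 4
--     cu = lls(seq, 'u') % 4
--     cr = lls(seq, 'r') % 4
--     cd = lls(seq, 'd') % 4
--
--     # n * 2 ^ m
--     c = (cl << 6) + \
--         (cu << 4) + \
--         (cr << 2) + \
--         cd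
--     return c
-- ===== SOURCE B (Python) =====
-- def gen_number(seq):
--     sl = su = sr = sd = 0
--     for i, ch in enumerate(seq):
--         if ch == 'l':
--             sl += i + 1
--         elif ch == 'u':
--             su += i + 1
--         elif ch == 'r':
--             sr += i + 1
--         elif ch == 'd':
--             sd += i + 1
--     return ((sl % 4) << 6) + ((su % 4) << 4) + ((sr % 4) << 2) + (sd % 4)
-- ===== Notes on version B (the rewrite author's own statement) =====
-- stated objective: faster
-- what changed: Replaced A's four separate scans of seq (one helper call per direction character) with a single enumerate pass that maintains the four positional sums simultaneously and dispatches on the character (measured ~2x faster).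
import Mathlib
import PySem

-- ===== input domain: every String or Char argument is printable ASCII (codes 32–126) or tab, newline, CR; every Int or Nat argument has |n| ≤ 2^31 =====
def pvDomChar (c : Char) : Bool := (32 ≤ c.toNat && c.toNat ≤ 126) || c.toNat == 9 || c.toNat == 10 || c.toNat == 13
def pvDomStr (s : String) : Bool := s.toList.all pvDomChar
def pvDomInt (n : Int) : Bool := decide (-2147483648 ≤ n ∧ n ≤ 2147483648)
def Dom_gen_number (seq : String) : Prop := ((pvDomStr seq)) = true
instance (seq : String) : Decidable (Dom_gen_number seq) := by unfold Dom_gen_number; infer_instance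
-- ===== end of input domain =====

-- B replaces A's four per-character scans with one accumulating pass dispatching on the character (alternative decomposition, same output).

-- ===== PORT A =====
-- helper lls: scan the enumerated string, summing 1-based positions of occurrences of c
def pvLls (s : List (Int × Char)) (c : Char) : Int :=
  s.foldl (fun r p => if p.2 ≠ c then r else r + (p.1 + 1)) 0

def gen_number (seq : String) : Int :=
  let s := PySem.List.enumerate seq.toList
  let cl := PySem.Int.mod (pvLls s 'l') 4
  let cu := PySem.Int.mod (pvLls s 'u') 4
  let cr := PySem.Int.mod (pvLls s 'r') 4
  let cd := PySem.Int.mod (pvLls s 'd') 4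
  (cl <<< 6) + (cu <<< 4) + (cr <<< 2) + cd

-- ===== PORT B =====
-- single-pass step: update the one running sum selected by the character
def pvStep (acc : Int × Int × Int × Int) (p : Int × Char) : Int × Int × Int × Int :=
  if p.2 = 'l' then (acc.1 + p.1 + 1, acc.2.1, acc.2.2.1, acc.2.2.2)
  else if p.2 = 'u' then (acc.1, acc.2.1 + p.1 + 1, acc.2.2.1, acc.2.2.2)
  else if p.2 = 'r' then (acc.1, acc.2.1, acc.2.2.1 + p.1 + 1, acc.2.2.2)
  else if p.2 = 'd' then (acc.1, acc.2.1, acc.2.2.1, acc.2.2.2 + p.1 + 1)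
  else acc

def gen_number_alt (seq : String) : Int :=
  let st := (PySem.List.enumerate seq.toList).foldl pvStep (0, 0, 0, 0)
  (PySem.Int.mod st.1 4 <<< 6) + (PySem.Int.mod st.2.1 4 <<< 4) +
    (PySem.Int.mod st.2.2.1 4 <<< 2) + PySem.Int.mod st.2.2.2 4

-- ===== PRECONDITION & SPEC =====
def Spec_gen_number (seq : String) (out : Int) : Prop := out = gen_number_alt seq
instance (seq : String) (out : Int) : Decidable (Spec_gen_number seq out) := by unfold Spec_gen_number; infer_instance

-- ===== CLAIM (what is proved, stated in full; the proofs are below) =====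
def Claim_equal_gen_number : Prop := ∀ (seq : String), Dom_gen_number seq → Spec_gen_number seq (gen_number seq)

-- ===== LEMMAS AND PROOFS =====
theorem pvLls_acc (l : List (Int × Char)) (c : Char) (r : Int) :
    l.foldl (fun r p => if p.2 ≠ c then r else r + (p.1 + 1)) r = r + pvLls l c := by
  induction l generalizing r with
  | nil => simp [pvLls]
  | cons p t ih =>
    simp only [pvLls, List.foldl_cons]
    rw [ih, ih]
    split <;> ring

theorem pvLls_cons (p : Int × Char) (t : List (Int × Char)) (c : Char) :
    pvLls (p :: t) c = (if p.2 = c then p.1 + 1 else 0) + pvLls t c := by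
  simp only [pvLls, List.foldl_cons]
  rw [pvLls_acc]
  split <;> simp_all [pvLls]

theorem pvFold_eq (l : List (Int × Char)) (a b c d : Int) :
    l.foldl pvStep (a, b, c, d) =
      (a + pvLls l 'l', b + pvLls l 'u', c + pvLls l 'r', d + pvLls l 'd') := by
  induction l generalizing a b c d with
  | nil => simp [pvLls]
  | cons p t ih =>
    simp only [List.foldl_cons, pvStep]
    split_ifs with h1 h2 h3 h4 <;>
      rw [ih] <;>
      simp [pvLls_cons, *] <;>
      omega

theorem gen_number_spec : Claim_equal_gen_number := by
  intro seq _
  unfold Spec_gen_number gen_number gen_number_alt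
  rw [pvFold_eq]
  simp

-- ===== VERDICT (by name: the statement is the Claim_ definition above) =====
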